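-- pv_equiv track=rewrite | github.com/FAST-HEP/fasthep-flow | src/hepflow/runtime/records.py | branch_to_segments
-- ===== SOURCE A (Python) =====
-- def _is_opaque_branch_name(branch: str) -> bool:
--     """
--     Branch names like 'ss./ss.nSingleScatters' contain './' and should be treated as *opaque*.
--     We should NOT try to split them as paths.
--     """
--     return "./" in branch or "../" in branch
--
-- def branch_to_segments(branch: str) -> list[str] | None:
--     """
--     Convert a branch reference into nested record segments.
--
--     Supports:
--       - ROOT subbranches using '/'   e.g. 'L1Upgrade/jetEt' -> ['L1Upgrade','jetEt']
--       - dotted objects              e.g. 'Muon.pt'         -> ['Muon','pt']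
--       - (legacy) join prefixes '.'  e.g. 'l1.L1Upgrade/jetEt' -> ['l1','L1Upgrade','jetEt']
--
--     Returns None if the branch should be treated as opaque (must match a leaf name exactly),
--     e.g. LZ 'ss./ss.nSingleScatters'.
--     """
--     b = str(branch).strip()
--     if not b:
--         return None
--
--     # Treat odd legacy names as opaque (e.g. LZ 'ss./ss.nSingleScatters')
--     if "./" in b or "../" in b:
--         return None
--     if _is_opaque_branch_name(b):
--         return None
--
--     dot_parts = [p for p in b.split(".") if p]
--     segs: list[str] = []
--     for p in dot_parts:
--         segs.extend([x for x in p.split("/") if x])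
--     return segs or None
-- ===== SOURCE B (Python) =====
-- def branch_to_segments(branch):
--     b = str(branch).strip()
--     if not b:
--         return None
--     if "./" in b:  # any '../' occurrence contains './', so one check suffices
--         return None
--     segs = []
--     cur = ""
--     for ch in b:
--         if ch == '.' or ch == '/':
--             if cur:
--                 segs.append(cur)
--             cur = ""
--         else:
--             cur += ch
--     if cur:
--         segs.append(cur)
--     return segs if segs else None
-- ===== Notes on version B (the rewrite author's own statement) =====
-- stated objective: alternative
-- what changed: Replaces the two-level split ('.' split, then a loop splitting each part by '/', filtering empties at both levels) with a single character-by-character scan that flushes the current token at either delimiter, and drops the redundant '../' guard (any '../' contains './').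
import Mathlib
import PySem

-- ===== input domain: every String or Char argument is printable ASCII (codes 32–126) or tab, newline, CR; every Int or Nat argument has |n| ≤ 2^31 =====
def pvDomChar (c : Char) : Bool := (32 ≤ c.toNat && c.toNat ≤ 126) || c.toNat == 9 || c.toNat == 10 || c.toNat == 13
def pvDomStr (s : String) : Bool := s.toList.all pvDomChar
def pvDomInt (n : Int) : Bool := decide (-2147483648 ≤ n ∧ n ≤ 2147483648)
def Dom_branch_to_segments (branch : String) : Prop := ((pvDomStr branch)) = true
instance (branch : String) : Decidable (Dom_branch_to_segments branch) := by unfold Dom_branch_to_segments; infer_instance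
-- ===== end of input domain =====

-- B replaces A's two-level split (by '.', then each part by '/') with one character scan
-- flushing the current token at either delimiter; same values everywhere (alternative decomposition).

-- ===== PORT A =====
def _is_opaque_branch_name (branch : String) : Bool :=
  PySem.Str.isIn "./" branch || PySem.Str.isIn "../" branch

def branch_to_segments (branch : String) : Option (List String) :=
  let b := PySem.Str.strip branch
  if b.toList.isEmpty then none
  else if PySem.Str.isIn "./" b || PySem.Str.isIn "../" b then none
  else if _is_opaque_branch_name b then none
  else
    let dot_parts : List (List Char) :=
      (PySem.Chars.splitOn b.toList ['.']).filter (fun p => !p.isEmpty)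
    let segs : List String := dot_parts.foldl
      (fun segs p =>
        segs ++ ((PySem.Chars.splitOn p ['/']).filter (fun x => !x.isEmpty)).map String.ofList) []
    if segs.isEmpty then none else some segs

-- ===== PORT B =====
def btsStep (st : List String × List Char) (ch : Char) : List String × List Char :=
  if ch == '.' || ch == '/' then
    ((if st.2.isEmpty then st.1 else st.1 ++ [String.ofList st.2]), [])
  else (st.1, st.2 ++ [ch])

def branch_to_segments_alt (branch : String) : Option (List String) :=
  let b := PySem.Str.strip branch
  if b.toList.isEmpty then none
  else if PySem.Str.isIn "./" b then none
  else
    let st := b.toList.foldl btsStep ([], [])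
    let segs := if st.2.isEmpty then st.1 else st.1 ++ [String.ofList st.2]
    if segs.isEmpty then none else some segs

-- ===== PRECONDITION & SPEC =====
def Spec_branch_to_segments (branch : String) (out : Option (List String)) : Prop := out = branch_to_segments_alt branch
instance (branch : String) (out : Option (List String)) : Decidable (Spec_branch_to_segments branch out) := by unfold Spec_branch_to_segments; infer_instance

-- ===== CLAIM (what is proved, stated in full; the proofs are below) =====
def Claim_equal_branch_to_segments : Prop := ∀ (branch : String), Dom_branch_to_segments branch → Spec_branch_to_segments branch (branch_to_segments branch)

-- ===== LEMMAS AND PROOFS =====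

-- the flat delimiter test B scans with
def pvDl (c : Char) : Bool := c == '.' || c == '/'

-- the filtered slash-split used on each dot part
def pvF (p : List Char) : List (List Char) :=
  (p.splitOnP (· == '/')).filter (fun x => !x.isEmpty)

lemma pv_modifyHead_id (xs : List (List Char)) :
    xs.modifyHead (fun t => t) = xs := by
  cases xs <;> simp

-- PySem's split at a single-character separator is List.splitOnP at that character
lemma pv_go_single (d : Char) (l : List Char) : ∀ (fuel : Nat) (cur : List Char)
    (acc : List (List Char)), l.length < fuel →
    PySem.Chars.splitOn.go [d] fuel l cur acc
      = acc.reverse ++ (l.splitOnP (· == d)).modifyHead (fun t => cur.reverse ++ t) := by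
  induction l with
  | nil =>
    intro fuel cur acc h
    cases fuel with
    | zero => omega
    | succ f => simp [PySem.Chars.splitOn.go, List.splitOnP_nil]
  | cons c rest ih =>
    intro fuel cur acc h
    cases fuel with
    | zero => omega
    | succ f =>
      by_cases hc : c = d
      · subst hc
        have hpre : List.isPrefixOf [c] (c :: rest) = true := by
          simp [List.isPrefixOf]
        rw [PySem.Chars.splitOn.go]
        simp only [hpre, if_pos]
        have hdrop : List.drop [c].length (c :: rest) = rest := rfl
        rw [hdrop, ih f [] (cur.reverse :: acc) (by simpa using Nat.lt_of_succ_lt_succ h)]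
        simp [List.splitOnP_cons, pv_modifyHead_id]
      · have hpre : List.isPrefixOf [d] (c :: rest) = false := by
          simp [List.isPrefixOf]
          intro hdc; exact hc hdc.symm
        rw [PySem.Chars.splitOn.go]
        simp only [hpre, Bool.false_eq_true, if_neg, not_false_iff]
        rw [ih f (c :: cur) acc (by simpa using Nat.lt_of_succ_lt_succ h)]
        rw [List.splitOnP_cons]
        simp only [beq_iff_eq, hc, if_neg, not_false_iff]
        cases hsp : rest.splitOnP (· == d) with
        | nil => exact absurd hsp (List.splitOnP_ne_nil _ _)
        | cons x xs => simp [List.modifyHead]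

lemma pv_splitOn_single (d : Char) (cs : List Char) :
    PySem.Chars.splitOn cs [d] = cs.splitOnP (· == d) := by
  unfold PySem.Chars.splitOn
  rw [pv_go_single d cs (cs.length + 1) [] [] (by omega)]
  simp [pv_modifyHead_id]

-- head of splitOnP is the takeWhile of the negated predicate
lemma pv_splitOnP_head (p : Char → Bool) (cs : List Char) :
    ∃ t, cs.splitOnP p = cs.takeWhile (fun c => !p c) :: t := by
  induction cs with
  | nil => exact ⟨[], by simp [List.splitOnP_nil]⟩
  | cons c cs ih =>
    obtain ⟨t, ht⟩ := ih
    by_cases h : p c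
    · exact ⟨cs.splitOnP p, by simp [List.splitOnP_cons, h]⟩
    · exact ⟨t, by simp [List.splitOnP_cons, h, ht, List.modifyHead]⟩

lemma pv_takeWhile_takeWhile (p q : Char → Bool) (l : List Char) :
    (l.takeWhile p).takeWhile q = l.takeWhile (fun c => p c && q c) := by
  induction l with
  | nil => simp
  | cons c cs ih => by_cases h : p c <;> by_cases h2 : q c <;> simp [h, h2, ih]

-- the nested dot-then-slash split with empty filtering is the flat split at either delimiter
lemma pv_nested_eq_flat (cs : List Char) :
    (cs.splitOnP (· == '.')).flatMap pvF
      = (cs.splitOnP pvDl).filter (fun t => !t.isEmpty) := by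
  induction cs with
  | nil => simp [List.splitOnP_nil, pvF]
  | cons c cs ih =>
    obtain ⟨xs, hx⟩ := pv_splitOnP_head (· == '.') cs
    obtain ⟨ys, hy⟩ := pv_splitOnP_head pvDl cs
    by_cases hd : c = '.'
    · subst hd
      have h1 : ('.' :: cs).splitOnP (· == '.') = [] :: cs.splitOnP (· == '.') := by
        simp [List.splitOnP_cons]
      have h2 : ('.' :: cs).splitOnP pvDl = [] :: cs.splitOnP pvDl := by
        simp [List.splitOnP_cons, pvDl]
      have hf : pvF [] = [] := by simp [pvF, List.splitOnP_nil]
      rw [h1, h2, List.flatMap_cons, hf, List.nil_append, ih, List.filter_cons]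
      simp
    · by_cases hs : c = '/'
      · subst hs
        have h1 : ('/' :: cs).splitOnP (· == '.')
            = ('/' :: cs.takeWhile (fun a => !(a == '.'))) :: xs := by
          simp [List.splitOnP_cons, hx, List.modifyHead]
        have h2 : ('/' :: cs).splitOnP pvDl = [] :: cs.splitOnP pvDl := by
          simp [List.splitOnP_cons, pvDl]
        have hf : pvF ('/' :: cs.takeWhile (fun a => !(a == '.')))
            = pvF (cs.takeWhile (fun a => !(a == '.'))) := by
          simp [pvF, List.splitOnP_cons, List.filter_cons]
        rw [h1, h2, List.flatMap_cons, hf, List.filter_cons]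
        simp only [List.isEmpty_nil, Bool.not_true, Bool.false_eq_true, if_neg]
        rw [← List.flatMap_cons (f := pvF), ← hx, ih]
        simp
      · have hdl : pvDl c = false := by simp [pvDl, hd, hs]
        obtain ⟨zs, hz⟩ := pv_splitOnP_head (· == '/') (cs.takeWhile (fun a => !(a == '.')))
        have hzy : (cs.takeWhile (fun a => !(a == '.'))).takeWhile (fun a => !(a == '/'))
            = cs.takeWhile (fun a => !pvDl a) := by
          rw [pv_takeWhile_takeWhile]
          congr 1
          funext x
          simp [pvDl]
        have h1 : (c :: cs).splitOnP (· == '.')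
            = (c :: cs.takeWhile (fun a => !(a == '.'))) :: xs := by
          simp [List.splitOnP_cons, hd, hx, List.modifyHead]
        have h2 : (c :: cs).splitOnP pvDl
            = (c :: cs.takeWhile (fun a => !pvDl a)) :: ys := by
          simp [List.splitOnP_cons, hdl, hy, List.modifyHead]
        have hf : pvF (c :: cs.takeWhile (fun a => !(a == '.')))
            = (c :: cs.takeWhile (fun a => !pvDl a)) :: zs.filter (fun x => !x.isEmpty) := by
          simp only [pvF, List.splitOnP_cons, beq_iff_eq, hs, if_neg, not_false_iff,
            Bool.false_eq_true, hz, List.modifyHead, hzy, List.filter_cons,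
            List.isEmpty_cons, Bool.not_false, if_pos]
        have ihx : pvF (cs.takeWhile (fun a => !(a == '.'))) ++ xs.flatMap pvF
            = ((cs.takeWhile (fun a => !pvDl a)) :: ys).filter (fun t => !t.isEmpty) := by
          rw [← List.flatMap_cons (f := pvF), ← hx, ih, hy]
        have hfx : pvF (cs.takeWhile (fun a => !(a == '.')))
            = ((cs.takeWhile (fun a => !pvDl a)) :: List.nil).filter (fun t => !t.isEmpty)
              ++ zs.filter (fun x => !x.isEmpty) := by
          simp only [pvF, hz, hzy, List.filter_cons, List.filter_nil]
          by_cases he : (cs.takeWhile (fun a => !pvDl a)).isEmpty <;> simp [he]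
        have htails : zs.filter (fun x => !x.isEmpty) ++ xs.flatMap pvF
            = ys.filter (fun t => !t.isEmpty) := by
          rw [hfx] at ihx
          by_cases he : (cs.takeWhile (fun a => !pvDl a)).isEmpty
          · simpa [List.filter_cons, he] using ihx
          · simp only [List.filter_cons, List.filter_nil, he, Bool.not_false, if_pos] at ihx
            simpa using ihx
        rw [h1, h2, List.flatMap_cons, hf, List.filter_cons]
        simp only [List.isEmpty_cons, Bool.not_false, if_pos, List.cons_append]
        rw [htails]

-- B's scan from any state, flushed, is the flat split filtered
lemma pv_scan_eq (cs : List Char) : ∀ (segs : List String) (cur : List Char),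
    (let st := cs.foldl btsStep (segs, cur);
     if st.2.isEmpty then st.1 else st.1 ++ [String.ofList st.2])
      = segs ++ (((cs.splitOnP pvDl).modifyHead (fun t => cur ++ t)).filter
          (fun t => !t.isEmpty)).map String.ofList := by
  induction cs with
  | nil =>
    intro segs cur
    cases cur <;> simp [List.splitOnP_nil, List.modifyHead]
  | cons c cs ih =>
    intro segs cur
    by_cases h : pvDl c = true
    · have hstep : btsStep (segs, cur) c
          = ((if cur.isEmpty then segs else segs ++ [String.ofList cur]), []) := by
        simp only [btsStep]
        rw [if_pos (by simpa [pvDl] using h)]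
      have h2 : (c :: cs).splitOnP pvDl = [] :: cs.splitOnP pvDl := by
        simp [List.splitOnP_cons, h]
      simp only [List.foldl_cons, hstep]
      rw [ih, h2, List.modifyHead_cons]
      simp only [List.nil_append, List.append_nil, pv_modifyHead_id, List.filter_cons]
      cases hc : cur.isEmpty
      · simp [hc]
      · have hnil : cur = [] := by simpa [List.isEmpty_iff] using hc
        simp [hc, hnil]
    · have hstep : btsStep (segs, cur) c = (segs, cur ++ [c]) := by
        simp only [btsStep]
        rw [if_neg (by simpa [pvDl] using h)]
      simp only [List.foldl_cons, hstep]
      rw [ih]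
      have h2 : (c :: cs).splitOnP pvDl = (cs.splitOnP pvDl).modifyHead (c :: ·) := by
        simp [List.splitOnP_cons, h]
      rw [h2]
      cases hsp : cs.splitOnP pvDl with
      | nil => exact absurd hsp (List.splitOnP_ne_nil _ _)
      | cons x xs => simp [List.modifyHead]

-- filtering the outer parts before the inner split changes nothing: pvF [] = []
lemma pv_filter_flatMap (parts : List (List Char)) :
    (parts.filter (fun p => !p.isEmpty)).flatMap pvF = parts.flatMap pvF := by
  induction parts with
  | nil => simp
  | cons p ps ih =>
    cases hp : p.isEmpty
    · simp [List.filter_cons, hp, ih]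
    · have : p = [] := by simpa [List.isEmpty_iff] using hp
      simp [List.filter_cons, hp, this, pvF, List.splitOnP_nil, ih]

lemma pv_guard (b : String) :
    (PySem.Str.isIn "./" b || PySem.Str.isIn "../" b) = PySem.Str.isIn "./" b := by
  cases h : PySem.Str.isIn "../" b
  · simp [h]
  · have hinf : "../".toList <:+: b.toList := (PySem.Str.isIn_iff_infix _ _).mp h
    have h2 : "./".toList <:+: b.toList :=
      List.IsInfix.trans (by exact ⟨['.'], [], by decide⟩) hinf
    have h3 : PySem.Str.isIn "./" b = true := (PySem.Str.isIn_iff_infix _ _).mpr h2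
    simp only [h3, h, Bool.or_self]

-- A's accumulating fold over the filtered dot parts, written as a flatMap
lemma pv_a_core (cs : List Char) :
    ((PySem.Chars.splitOn cs ['.']).filter (fun p => !p.isEmpty)).foldl
        (fun segs p =>
          segs ++ ((PySem.Chars.splitOn p ['/']).filter (fun x => !x.isEmpty)).map String.ofList) []
      = (((cs.splitOnP pvDl).filter (fun t => !t.isEmpty)).map String.ofList) := by
  have hfold : ∀ (parts : List (List Char)) (acc : List String),
      parts.foldl (fun segs p => segs ++ (pvF p).map String.ofList) acc
        = acc ++ (parts.flatMap pvF).map String.ofList := by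
    intro parts
    induction parts with
    | nil => intro acc; simp
    | cons p ps ih => intro acc; simp [ih]
  have hconv : (fun (segs : List String) (p : List Char) =>
      segs ++ ((PySem.Chars.splitOn p ['/']).filter (fun x => !x.isEmpty)).map String.ofList)
      = (fun segs p => segs ++ (pvF p).map String.ofList) := by
    funext segs p
    rw [pv_splitOn_single]
    rfl
  rw [pv_splitOn_single, hconv, hfold, List.nil_append, pv_filter_flatMap, pv_nested_eq_flat]

-- ===== VERDICT (by name: the statement is the Claim_ definition above) =====
theorem branch_to_segments_spec : Claim_equal_branch_to_segments := by
  intro branch _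
  unfold Spec_branch_to_segments branch_to_segments branch_to_segments_alt _is_opaque_branch_name
  simp only [pv_guard]
  by_cases h1 : (PySem.Str.strip branch).toList.isEmpty = true
  · simp only [if_pos h1]
  · simp only [if_neg h1]
    by_cases h2 : PySem.Str.isIn "./" (PySem.Str.strip branch) = true
    · simp only [if_pos h2]
    · simp only [if_neg h2]
      rw [pv_a_core]
      have hB := pv_scan_eq (PySem.Str.strip branch).toList [] []
      simp only [List.nil_append, pv_modifyHead_id] at hB
      rw [hB]
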